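-- pv_equiv track=rewrite | github.com/daniel-reich/ubiquitous-fiesta | F77JQs68RSeTBiGtv_8.py | diamond_sum
-- ===== SOURCE A (Python) =====
-- def diamond_sum(n):
--     if n == 1:
--         return 1
--     half = n // 2
--     ans = half + 1
--     mid = half + 1
--     for r in range(1, n - 1):
--         mid += n
--         ans += 2 * mid
--     ans += mid + n
--     return ans
-- ===== SOURCE B (Python) =====
-- def diamond_sum(n):
--     if n == 1:
--         return 1
--     h = n // 2 + 1
--     if n < 3:
--         return 2 * h + n
--     return 2 * h * (n - 1) + n * (n * (n - 2) + 1)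
-- ===== Notes on version B (the rewrite author's own statement) =====
-- stated objective: faster
-- what changed: Replaced A's linear accumulation loop over the diamond rows with a direct closed-form polynomial (arithmetic-series sum), with the same base cases as A.
import Mathlib
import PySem

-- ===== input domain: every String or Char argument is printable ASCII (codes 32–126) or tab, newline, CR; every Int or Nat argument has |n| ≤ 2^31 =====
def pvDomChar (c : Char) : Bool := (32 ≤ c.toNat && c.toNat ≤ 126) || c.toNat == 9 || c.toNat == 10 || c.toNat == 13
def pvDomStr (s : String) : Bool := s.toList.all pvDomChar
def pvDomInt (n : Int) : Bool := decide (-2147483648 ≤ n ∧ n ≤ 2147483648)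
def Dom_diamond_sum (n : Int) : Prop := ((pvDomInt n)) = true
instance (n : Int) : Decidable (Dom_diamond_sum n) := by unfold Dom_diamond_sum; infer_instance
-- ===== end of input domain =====

-- B replaces A's O(n) accumulation loop by a closed-form polynomial (objective: faster, asymptotic).

-- ===== PORT A =====
def diamond_sum (n : Int) : Int :=
  if n = 1 then 1
  else
    let half := PySem.Int.floordiv n 2
    let ans := half + 1
    let mid := half + 1
    let p := (PySem.List.pyRange 1 (n - 1) 1).foldl
      (fun (p : Int × Int) _ => (p.1 + n, p.2 + 2 * (p.1 + n))) (mid, ans)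
    p.2 + p.1 + n

-- ===== PORT B =====
def diamond_sum_alt (n : Int) : Int :=
  if n = 1 then 1
  else
    let h := PySem.Int.floordiv n 2 + 1
    if n < 3 then 2 * h + n
    else 2 * h * (n - 1) + n * (n * (n - 2) + 1)

-- ===== PRECONDITION & SPEC =====
def Spec_diamond_sum (n : Int) (out : Int) : Prop := out = diamond_sum_alt n
instance (n : Int) (out : Int) : Decidable (Spec_diamond_sum n out) := by unfold Spec_diamond_sum; infer_instance

-- ===== CLAIM (what is proved, stated in full; the proofs are below) =====
def Claim_equal_diamond_sum : Prop := ∀ (n : Int), Dom_diamond_sum n → Spec_diamond_sum n (diamond_sum n)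

-- ===== LEMMAS AND PROOFS =====

-- Closed form of A's loop: each iteration adds n to mid and 2*mid' to ans; the element is ignored.
theorem pv_loop_closed (n : Int) (l : List Int) : ∀ (mid ans : Int),
    l.foldl (fun (p : Int × Int) _ => (p.1 + n, p.2 + 2 * (p.1 + n))) (mid, ans)
      = (mid + (l.length : Int) * n,
         ans + 2 * (l.length : Int) * mid + n * (l.length : Int) * ((l.length : Int) + 1)) := by
  induction l with
  | nil => intro mid ans; simp
  | cons x l ih =>
      intro mid ans
      simp only [List.foldl_cons, ih, List.length_cons]
      refine Prod.ext ?_ ?_ <;> · push_cast; ring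

theorem diamond_sum_spec' (n : Int) : diamond_sum n = diamond_sum_alt n := by
  unfold diamond_sum diamond_sum_alt
  by_cases h1 : n = 1
  · simp [h1]
  · simp only [h1, if_false]
    by_cases h3 : n < 3
    · rw [PySem.List.pyRange_one_eq_nil (by omega)]
      simp [h3]
      ring
    · rw [pv_loop_closed, PySem.List.length_pyRange_one]
      have hl : (((n - 1 - 1).toNat : Int)) = n - 2 := by omega
      rw [hl]
      simp only [h3, if_false]
      ring

-- ===== VERDICT (by name: the statement is the Claim_ definition above) =====
theorem diamond_sum_spec : Claim_equal_diamond_sum := by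
  intro n _
  exact diamond_sum_spec' n
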